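-- pv_equiv track=rewrite | github.com/redkyo017/pdf_borehole_report_analyze | find_chemical_tables.py | clean_table_preview
-- ===== SOURCE A (Python) =====
-- def clean_table_preview(table, max_rows=5):
--     rows = []
--     for row in table:
--         cleaned_row = [str(cell).strip() if cell else "" for cell in row]
--         if any(cleaned_row):
--             rows.append(cleaned_row)
--     if not rows:
--         return []
--
--     # drop empty columns
--     max_len = max(len(row) for row in rows)
--     cols_to_keep = [
--         idx for idx in range(max_len) if any(row[idx] if idx < len(row) else "" for row in rows)
--     ]
--     trimmed = []
--     for row in rows[:max_rows]:
--         trimmed.append(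
--             [
--                 row[idx] if idx < len(row) else ""
--                 for idx in cols_to_keep
--             ]
--         )
--     return trimmed
-- ===== SOURCE B (Python) =====
-- def clean_table_preview(table, max_rows=5):
--     rows = []
--     present = set()
--     for row in table:
--         cleaned_row = [str(cell).strip() if cell else "" for cell in row]
--         hit = {idx for idx, cell in enumerate(cleaned_row) if cell}
--         if hit:
--             rows.append(cleaned_row)
--             present |= hit
--     if not rows:
--         return []
--     cols_to_keep = sorted(present)
--     return [[row[idx] if idx < len(row) else "" for idx in cols_to_keep]
--             for row in rows[:max_rows]]
-- ===== Notes on version B (the rewrite author's own statement) =====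
-- stated objective: alternative
-- what changed: Replaces A's per-column nested scan (for each idx in range(max_len), rescan all rows) with a single row-major pass that accumulates a set of column indices containing a truthy cell, then sorts it; the trailing projection is shared.
import Mathlib
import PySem

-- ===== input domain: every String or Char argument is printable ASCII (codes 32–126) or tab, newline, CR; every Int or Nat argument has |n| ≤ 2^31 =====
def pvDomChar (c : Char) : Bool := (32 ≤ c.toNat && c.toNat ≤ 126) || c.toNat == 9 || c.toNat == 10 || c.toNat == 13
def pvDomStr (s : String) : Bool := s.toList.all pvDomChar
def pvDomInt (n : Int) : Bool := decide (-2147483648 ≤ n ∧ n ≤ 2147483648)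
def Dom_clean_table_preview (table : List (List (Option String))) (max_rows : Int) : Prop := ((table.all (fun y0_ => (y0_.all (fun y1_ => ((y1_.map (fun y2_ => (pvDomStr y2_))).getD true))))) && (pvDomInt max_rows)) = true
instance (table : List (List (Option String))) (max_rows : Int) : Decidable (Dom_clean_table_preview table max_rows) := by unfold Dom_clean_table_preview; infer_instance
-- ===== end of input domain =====

-- B replaces A's per-column nested scan (range(max_len) × rows) by one row-major pass that
-- records, in a set, every column index holding a truthy cell; objective: alternative decomposition.

-- shared helper: '[str(cell).strip() if cell else "" for cell in row]' (both Pythons contain this comprehension)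
def pvCleanRow (row : List (Option String)) : List String :=
  row.map (fun cell => match cell with
    | some s => if s ≠ "" then PySem.Str.strip s else ""
    | none => "")

-- shared helper: 'row[idx] if idx < len(row) else ""' (both Pythons; only reached with 0 ≤ idx)
def pvCell (row : List String) (idx : Int) : String :=
  if idx < (row.length : Int) then row.getD idx.toNat "" else ""

-- ===== PORT A =====
def clean_table_preview (table : List (List (Option String))) (max_rows : Int) : List (List String) :=
  let rows := table.foldl (fun rows row =>
    let cleaned_row := pvCleanRow row
    if cleaned_row.any (fun c => c ≠ "") then rows ++ [cleaned_row] else rows) []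
  if rows = [] then []
  else
    let max_len : Int := (rows.map (fun row => (row.length : Int))).foldl max 0
    let cols_to_keep := (PySem.List.pyRange 0 max_len 1).filter
      (fun idx => rows.any (fun row => pvCell row idx ≠ ""))
    (PySem.List.slice rows none (some max_rows)).map (fun row => cols_to_keep.map (fun idx => pvCell row idx))

-- ===== PORT B =====
def clean_table_preview_alt (table : List (List (Option String))) (max_rows : Int) : List (List String) :=
  let st := table.foldl (fun (st : List (List String) × PySem.Set Int) row =>
    let cleaned_row := pvCleanRow row
    let hit : PySem.Set Int :=
      PySem.Set.ofList (((PySem.List.enumerate cleaned_row).filter (fun p => p.2 ≠ "")).map (·.1))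
    if hit ≠ [] then (st.1 ++ [cleaned_row], PySem.Set.union st.2 hit) else st)
    ([], PySem.Set.empty)
  if st.1 = [] then []
  else
    let cols_to_keep := PySem.List.sorted st.2 (fun x => x) false
    (PySem.List.slice st.1 none (some max_rows)).map (fun row => cols_to_keep.map (fun idx => pvCell row idx))

-- ===== PRECONDITION & SPEC =====
def Spec_clean_table_preview (table : List (List (Option String))) (max_rows : Int) (out : List (List String)) : Prop := out = clean_table_preview_alt table max_rows
instance (table : List (List (Option String))) (max_rows : Int) (out : List (List String)) : Decidable (Spec_clean_table_preview table max_rows out) := by unfold Spec_clean_table_preview; infer_instance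

-- ===== CLAIM (what is proved, stated in full; the proofs are below) =====
def Claim_equal_clean_table_preview : Prop := ∀ (table : List (List (Option String))) (max_rows : Int), Dom_clean_table_preview table max_rows → Spec_clean_table_preview table max_rows (clean_table_preview table max_rows)

-- ===== LEMMAS AND PROOFS =====

-- A's loop step
def pvStepA (rows : List (List String)) (row : List (Option String)) : List (List String) :=
  let cleaned_row := pvCleanRow row
  if cleaned_row.any (fun c => c ≠ "") then rows ++ [cleaned_row] else rows

-- B's loop step
def pvStepB (st : List (List String) × PySem.Set Int) (row : List (Option String)) :
    List (List String) × PySem.Set Int :=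
  let cleaned_row := pvCleanRow row
  let hit : PySem.Set Int :=
    PySem.Set.ofList (((PySem.List.enumerate cleaned_row).filter (fun p => p.2 ≠ "")).map (·.1))
  if hit ≠ [] then (st.1 ++ [cleaned_row], PySem.Set.union st.2 hit) else st

theorem pvFoldA_eq (table : List (List (Option String))) (acc : List (List String)) :
    table.foldl (fun rows row =>
      let cleaned_row := pvCleanRow row
      if cleaned_row.any (fun c => c ≠ "") then rows ++ [cleaned_row] else rows) acc
    = table.foldl pvStepA acc := rfl

theorem pvFoldB_eq (table : List (List (Option String))) (st : List (List String) × PySem.Set Int) :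
    table.foldl (fun (st : List (List String) × PySem.Set Int) row =>
      let cleaned_row := pvCleanRow row
      let hit : PySem.Set Int :=
        PySem.Set.ofList (((PySem.List.enumerate cleaned_row).filter (fun p => p.2 ≠ "")).map (·.1))
      if hit ≠ [] then (st.1 ++ [cleaned_row], PySem.Set.union st.2 hit) else st) st
    = table.foldl pvStepB st := rfl

theorem pvOfList_eq_nil_iff {α : Type} [BEq α] [LawfulBEq α] (xs : List α) :
    PySem.Set.ofList xs = [] ↔ xs = [] := by
  cases xs with
  | nil => simp
  | cons x xs => simp [PySem.Set.ofList_cons]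

-- membership in the per-row index set 'hit'
theorem pvMemHit (cr : List String) (i : Int) :
    i ∈ PySem.Set.ofList (((PySem.List.enumerate cr).filter (fun p => p.2 ≠ "")).map (·.1)) ↔
    pvCell cr i ≠ "" ∧ 0 ≤ i := by
  rw [PySem.Set.mem_ofList]
  simp only [List.mem_map, List.mem_filter, PySem.List.mem_enumerate_iff]
  constructor
  · rintro ⟨⟨j, c⟩, ⟨⟨k, hk, hpk⟩, hne⟩, hfst⟩
    obtain ⟨rfl, rfl⟩ := Prod.mk.injEq .. ▸ hpk
    subst hfst
    simp only [decide_not] at hne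
    refine ⟨?_, by positivity⟩
    simp only [pvCell]
    rw [if_pos (by exact_mod_cast (by omega : (0:Int) + k < cr.length))]
    have : ((0:Int) + k).toNat = k := by omega
    rw [this, List.getD_eq_getElem _ _ hk]
    simpa using hne
  · rintro ⟨hne, hnn⟩
    simp only [pvCell] at hne
    by_cases hlt : i < (cr.length : Int)
    · rw [if_pos hlt] at hne
      have hk : i.toNat < cr.length := by omega
      refine ⟨(i, cr[i.toNat]), ⟨⟨i.toNat, hk, by simp; omega⟩, ?_⟩, rfl⟩
      rw [List.getD_eq_getElem _ _ hk] at hne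
      simpa using hne
    · rw [if_neg hlt] at hne; exact absurd rfl hne

-- A's and B's loop guards agree
theorem pvHit_ne_nil_iff (cr : List String) :
    (PySem.Set.ofList (((PySem.List.enumerate cr).filter (fun p => p.2 ≠ "")).map (·.1)) ≠ ([] : List Int)) ↔
    cr.any (fun c => c ≠ "") = true := by
  rw [Ne, pvOfList_eq_nil_iff]
  simp only [List.map_eq_nil_iff, List.filter_eq_nil_iff, PySem.List.mem_enumerate_iff,
    List.any_eq_true]
  constructor
  · intro h
    push Not at h
    obtain ⟨⟨j, c⟩, ⟨k, hk, hpk⟩, hne⟩ := h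
    obtain ⟨rfl, rfl⟩ := Prod.mk.injEq .. ▸ hpk
    exact ⟨cr[k], List.getElem_mem hk, by simpa using hne⟩
  · rintro ⟨c, hc, hne⟩
    obtain ⟨k, hk, rfl⟩ := List.mem_iff_getElem.mp hc
    intro h
    exact absurd (by simpa using hne) (by simpa using h ((0:Int)+k, cr[k]) ⟨k, hk, rfl⟩)

-- B's fold: first component is A's fold; second is a nodup set of exactly the truthy (row, column) indices
theorem pvFold_inv (table : List (List (Option String))) (acc : List (List String))
    (p : PySem.Set Int) (hnd : p.Nodup)
    (hmem : ∀ i, i ∈ p ↔ ∃ row ∈ acc, pvCell row i ≠ "" ∧ 0 ≤ i) :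
    (table.foldl pvStepB (acc, p)).1 = table.foldl pvStepA acc ∧
    (table.foldl pvStepB (acc, p)).2.Nodup ∧
    (∀ i, i ∈ (table.foldl pvStepB (acc, p)).2 ↔
      ∃ row ∈ table.foldl pvStepA acc, pvCell row i ≠ "" ∧ 0 ≤ i) := by
  induction table generalizing acc p with
  | nil => exact ⟨rfl, hnd, hmem⟩
  | cons row rest ih =>
    simp only [List.foldl_cons]
    by_cases h : (pvCleanRow row).any (fun c => c ≠ "") = true
    · have hB : pvStepB (acc, p) row =
        (acc ++ [pvCleanRow row],
         PySem.Set.union p (PySem.Set.ofList (((PySem.List.enumerate (pvCleanRow row)).filter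
           (fun q => q.2 ≠ "")).map (·.1)))) := by
        simp only [pvStepB]
        rw [if_pos ((pvHit_ne_nil_iff _).mpr h)]
      have hA : pvStepA acc row = acc ++ [pvCleanRow row] := by
        simp only [pvStepA]; rw [if_pos h]
      rw [hB, hA]
      refine ih _ _ (PySem.Set.nodup_union _ _ hnd) ?_
      intro i
      rw [PySem.Set.mem_union, hmem i, pvMemHit]
      simp only [List.mem_append, List.mem_singleton]
      constructor
      · rintro (⟨r, hr, hc⟩ | hc)
        · exact ⟨r, Or.inl hr, hc⟩
        · exact ⟨pvCleanRow row, Or.inr rfl, hc⟩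
      · rintro ⟨r, hr | rfl, hc⟩
        · exact Or.inl ⟨r, hr, hc⟩
        · exact Or.inr hc
    · have hB : pvStepB (acc, p) row = (acc, p) := by
        simp only [pvStepB]
        rw [if_neg (by simpa using (not_iff_not.mpr (pvHit_ne_nil_iff (pvCleanRow row))).mpr h)]
      have hA : pvStepA acc row = acc := by simp only [pvStepA]; rw [if_neg h]
      rw [hB, hA]
      exact ih _ _ hnd hmem

-- foldl max bounds
theorem pvFoldl_max_le (l : List Int) (a : Int) : a ≤ l.foldl max a := by
  induction l generalizing a with
  | nil => exact le_refl a
  | cons x xs ih => exact le_trans (le_max_left a x) (ih _)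

theorem pvMem_le_foldl_max (l : List Int) : ∀ (a x : Int), x ∈ l → x ≤ l.foldl max a := by
  induction l with
  | nil => intro a x hx; cases hx
  | cons y ys ih =>
    intro a x hx
    rcases List.mem_cons.mp hx with rfl | h
    · exact le_trans (le_max_right a x) (pvFoldl_max_le _ _)
    · exact ih _ _ h

-- the sorted presence set equals A's filtered column range
theorem pvCols_eq (rows : List (List String)) (p : PySem.Set Int) (hnd : p.Nodup)
    (hmem : ∀ i, i ∈ p ↔ ∃ row ∈ rows, pvCell row i ≠ "" ∧ 0 ≤ i) :
    PySem.List.sorted p (fun x => x) false =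
    (PySem.List.pyRange 0 ((rows.map (fun row => (row.length : Int))).foldl max 0) 1).filter
      (fun idx => rows.any (fun row => pvCell row idx ≠ "")) := by
  set max_len := (rows.map (fun row => (row.length : Int))).foldl max 0 with hml
  have hpw : ((PySem.List.pyRange 0 max_len 1).filter
      (fun idx => rows.any (fun row => pvCell row idx ≠ ""))).Pairwise (· < ·) :=
    (PySem.List.pairwise_lt_pyRange_one 0 max_len).filter _
  refine PySem.List.sorted_eq_of_perm_of_pairwise_lt _ _ _ ?_ hpw
  refine (List.perm_ext_iff_of_nodup (hpw.nodup) hnd).mpr ?_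
  intro i
  rw [hmem i]
  simp only [List.mem_filter, PySem.List.mem_pyRange_one, List.any_eq_true, decide_eq_true_eq]
  constructor
  · rintro ⟨⟨h0, hlt⟩, r, hr, hc⟩
    exact ⟨r, hr, by simpa using hc, h0⟩
  · rintro ⟨r, hr, hc, h0⟩
    have hlen : i < (r.length : Int) := by
      by_contra hge
      exact hc (by simp [pvCell, if_neg hge])
    have : (r.length : Int) ≤ max_len :=
      pvMem_le_foldl_max _ _ _ (List.mem_map.mpr ⟨r, hr, rfl⟩)
    exact ⟨⟨h0, lt_of_lt_of_le hlen this⟩, r, hr, by simpa using hc⟩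

-- ===== VERDICT (by name: the statement is the Claim_ definition above) =====
theorem clean_table_preview_spec : Claim_equal_clean_table_preview := by
  intro table max_rows _
  show clean_table_preview table max_rows = clean_table_preview_alt table max_rows
  unfold clean_table_preview clean_table_preview_alt
  rw [pvFoldA_eq, pvFoldB_eq]
  obtain ⟨h1, h2, h3⟩ := pvFold_inv table [] PySem.Set.empty (by simp [PySem.Set.empty])
    (by intro i; simp [PySem.Set.empty])
  simp only [h1]
  by_cases hnil : table.foldl pvStepA [] = []
  · simp [hnil]
  · rw [if_neg hnil, if_neg hnil]
    rw [pvCols_eq (table.foldl pvStepA []) _ h2 h3]
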